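-- pv_equiv track=rewrite | github.com/picaso133/scrabble | main.py | hashScore
-- ===== SOURCE A (Python) =====
-- def hashScore(hash1, hash2):
--     score = 0; # initialize accumulator
--     hash1_keys = set(hash1.keys()) # get keys from hash1
--     hash2_keys = set(hash2.keys()) # get keys from hash2
--     interserction = hash1_keys.intersection(hash2_keys) # get keys intersection
--     diff = hash2_keys - hash1_keys # get keys differentiation
--     if len(diff): # if any key doesn't exist in hash means that hash doesn't match
--         return 0 # set accumulator 0
--     else: # all the keys exist in the hash
--         for key in interserction: # parse key intersection
--             if (hash1[key] >= hash2[key]): # if count keys from the hash2 are less when hash1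
--                 score += int(hash2[key]) # increment the accumulator
--             else: # too many keys
--                 return 0 # set accumulator 0
--     return score # return accumulator
-- ===== SOURCE B (Python) =====
-- def hashScore(hash1, hash2):
--     # Sort both dicts' items by key once, then do a single two-pointer merge
--     # scan: no hashing, no sets -- a comparison-based subset-multiset check.
--     a = sorted(hash1.items(), key=lambda kv: kv[0])
--     b = sorted(hash2.items(), key=lambda kv: kv[0])
--     total = 0
--     i = j = 0
--     while j < len(b):
--         kb, vb = b[j]
--         if i < len(a) and a[i][0] < kb:
--             i += 1
--             continue
--         if i == len(a) or a[i][0] > kb or a[i][1] < vb: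
--             return 0
--         total += int(vb)
--         i += 1
--         j += 1
--     return total
-- ===== Notes on version B (the rewrite author's own statement) =====
-- stated objective: alternative
-- what changed: Replaces A's set constructions with intersection/difference plus a per-key hash-lookup loop by a comparison-based algorithm: sort both dicts' items by key once and verify coverage and counts in a single two-pointer merge scan, with no hashing or membership tests at all.
import Mathlib
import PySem

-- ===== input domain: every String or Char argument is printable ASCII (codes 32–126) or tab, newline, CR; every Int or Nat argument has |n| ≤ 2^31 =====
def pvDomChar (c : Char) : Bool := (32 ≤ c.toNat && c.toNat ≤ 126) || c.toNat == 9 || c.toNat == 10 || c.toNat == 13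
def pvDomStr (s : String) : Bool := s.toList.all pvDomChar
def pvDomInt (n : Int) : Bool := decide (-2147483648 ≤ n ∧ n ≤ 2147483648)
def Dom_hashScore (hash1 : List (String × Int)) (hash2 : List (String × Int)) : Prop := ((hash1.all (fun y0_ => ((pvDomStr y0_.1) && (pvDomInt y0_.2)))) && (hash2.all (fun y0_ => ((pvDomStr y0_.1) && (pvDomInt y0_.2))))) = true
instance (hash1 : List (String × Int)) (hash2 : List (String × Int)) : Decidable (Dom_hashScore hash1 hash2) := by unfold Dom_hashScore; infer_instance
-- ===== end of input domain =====

-- B replaces A's set constructions (intersection/difference) and per-key hash lookups by a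
-- comparison-based algorithm: sort both item lists by key, one two-pointer merge scan
-- (objective: alternative; not faster).

-- ===== PORT A =====
-- the 'for key in interserction' loop with its early 'return 0'
def hashScoreLoopA (hash1 hash2 : List (String × Int)) : List String → Int → Int
  | [], score => score
  | key :: rest, score =>
    if (hash2.lookup key).getD 0 ≤ (hash1.lookup key).getD 0 then
      hashScoreLoopA hash1 hash2 rest (score + (hash2.lookup key).getD 0)
    else 0

def hashScore (hash1 : List (String × Int)) (hash2 : List (String × Int)) : Int :=
  let hash1_keys : PySem.Set String := PySem.Set.ofList (hash1.map Prod.fst)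
  let hash2_keys : PySem.Set String := PySem.Set.ofList (hash2.map Prod.fst)
  let interserction := PySem.Set.inter hash1_keys hash2_keys
  let diff := PySem.Set.diff hash2_keys hash1_keys
  if PySem.Set.len diff ≠ 0 then 0
  else hashScoreLoopA hash1 hash2 interserction 0

-- ===== PORT B =====
-- the 'while j < len(b)' two-pointer merge loop over the two sorted item lists;
-- the index pointers i, j are rendered as the corresponding suffix lists
def hashGo : List (String × Int) → List (String × Int) → Int → Int
  | _, [], total => total                                   -- j == len(b): return total
  | [], _ :: _, _ => 0                                      -- i == len(a): return 0
  | (ka, va) :: a', (kb, vb) :: b', total =>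
    if ka < kb then hashGo a' ((kb, vb) :: b') total        -- a[i][0] < kb: i += 1; continue
    else if kb < ka || va < vb then 0                       -- a[i][0] > kb or a[i][1] < vb
    else hashGo a' b' (total + vb)                          -- total += int(vb); i += 1; j += 1
termination_by a b _ => a.length + b.length

def hashScore_alt (hash1 : List (String × Int)) (hash2 : List (String × Int)) : Int :=
  let a := PySem.List.sorted hash1 (fun kv => kv.1) false
  let b := PySem.List.sorted hash2 (fun kv => kv.1) false
  hashGo a b 0

-- ===== PRECONDITION & SPEC =====
-- Pre_ excludes association lists in which either argument repeats a key: such lists do not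
-- represent any Python dict (dict keys are unique), so A's behaviour there is unspecified.
def Pre_hashScore (hash1 : List (String × Int)) (hash2 : List (String × Int)) : Prop :=
  (hash1.map Prod.fst).Nodup ∧ (hash2.map Prod.fst).Nodup
instance (hash1 : List (String × Int)) (hash2 : List (String × Int)) : Decidable (Pre_hashScore hash1 hash2) := by unfold Pre_hashScore; infer_instance

def pvWitness_hashScore : (List (String × Int)) × (List (String × Int)) :=
  ([("a", 2), ("b", 1)], [("a", 1), ("b", 1)])

def Spec_hashScore (hash1 : List (String × Int)) (hash2 : List (String × Int)) (out : Int) : Prop := out = hashScore_alt hash1 hash2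
instance (hash1 : List (String × Int)) (hash2 : List (String × Int)) (out : Int) : Decidable (Spec_hashScore hash1 hash2 out) := by unfold Spec_hashScore; infer_instance

-- ===== CLAIM (what is proved, stated in full; the proofs are below) =====
def Claim_equal_hashScore : Prop := ∀ (hash1 : List (String × Int)) (hash2 : List (String × Int)), Dom_hashScore hash1 hash2 → Pre_hashScore hash1 hash2 → Spec_hashScore hash1 hash2 (hashScore hash1 hash2)

-- ===== LEMMAS AND PROOFS =====

-- the per-item feasibility check both characterisations are phrased with
def hashChk (a : List (String × Int)) (p : String × Int) : Bool :=
  match a.lookup p.1 with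
  | none => false
  | some w => decide (p.2 ≤ w)

-- Bool.all respects pointwise-equal predicates over the list
theorem all_congr_mem {α : Type} {l : List α} {p q : α → Bool}
    (h : ∀ x ∈ l, p x = q x) : l.all p = l.all q := by
  induction l with
  | nil => rfl
  | cons x xs ih =>
    simp only [List.all_cons, h x (List.mem_cons_self), ih (fun y hy => h y (List.mem_cons_of_mem x hy))]

-- first-match lookup succeeds exactly on the listed keys
theorem lookup_isSome_iff {β : Type} (l : List (String × β)) (k : String) :
    (l.lookup k).isSome ↔ k ∈ l.map Prod.fst := by
  induction l with
  | nil => simp [List.lookup]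
  | cons p rest ih =>
    obtain ⟨a, b⟩ := p
    by_cases h : a = k
    · subst h; simp [List.lookup]
    · have hb : (k == a) = false := by simp [Ne.symm h]
      simp [List.lookup, hb, ih, Ne.symm h]

-- with unique keys, lookup of a listed pair returns its value
theorem lookup_eq_of_mem {β : Type} {l : List (String × β)} (hnd : (l.map Prod.fst).Nodup)
    {k : String} {v : β} (hm : (k, v) ∈ l) : l.lookup k = some v := by
  induction l with
  | nil => simp at hm
  | cons p rest ih =>
    obtain ⟨a, b⟩ := p
    simp only [List.map_cons, List.nodup_cons] at hnd
    rcases List.mem_cons.mp hm with h | h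
    · obtain ⟨rfl, rfl⟩ := Prod.mk.injEq .. ▸ h
      simp [List.lookup]
    · have hk : k ∈ rest.map Prod.fst := List.mem_map_of_mem h
      have hne : (k == a) = false := by
        simp only [beq_eq_false_iff_ne]
        exact fun e => hnd.1 (e ▸ hk)
      simp only [List.lookup, hne]
      exact ih hnd.2 h

-- with unique keys, lookup is invariant under permutation
theorem lookup_perm {β : Type} {l l' : List (String × β)} (hnd : (l.map Prod.fst).Nodup)
    (hp : l'.Perm l) (k : String) : l'.lookup k = l.lookup k := by
  have hnd' : (l'.map Prod.fst).Nodup := ((hp.map Prod.fst).nodup_iff).mpr hnd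
  by_cases hk : k ∈ l.map Prod.fst
  · obtain ⟨⟨k', v⟩, hm, he⟩ := List.mem_map.mp hk
    subst he
    rw [lookup_eq_of_mem hnd hm, lookup_eq_of_mem hnd' (hp.mem_iff.mpr hm)]
  · have h1 : l.lookup k = none := by
      rw [← Option.not_isSome_iff_eq_none]; rw [lookup_isSome_iff]; exact hk
    have h2 : l'.lookup k = none := by
      rw [← Option.not_isSome_iff_eq_none]; rw [lookup_isSome_iff]
      intro h; exact hk (((hp.map Prod.fst).mem_iff).mp h)
    rw [h1, h2]

-- closed form of A's loop: all-counts-ok ⇒ score + Σ hash2-counts, else 0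
theorem loopA_char (hash1 hash2 : List (String × Int)) (ks : List String) (score : Int) :
    hashScoreLoopA hash1 hash2 ks score =
      if ks.all (fun k => (hash2.lookup k).getD 0 ≤ (hash1.lookup k).getD 0)
      then score + (ks.map (fun k => (hash2.lookup k).getD 0)).sum else 0 := by
  induction ks generalizing score with
  | nil => simp [hashScoreLoopA]
  | cons k rest ih =>
    by_cases h : (hash2.lookup k).getD 0 ≤ (hash1.lookup k).getD 0
    · simp [hashScoreLoopA, h, ih]
      split_ifs <;> ring_nf
    · simp [hashScoreLoopA, h]

-- closed form of B's merge loop, for key-strictly-sorted inputs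
theorem hashGo_char (a b : List (String × Int)) (total : Int)
    (ha : a.Pairwise (fun x y => x.1 < y.1)) (hb : b.Pairwise (fun x y => x.1 < y.1)) :
    hashGo a b total =
      if b.all (hashChk a) then total + (b.map Prod.snd).sum else 0 := by
  induction a generalizing b total with
  | nil =>
    cases b with
    | nil => simp [hashGo]
    | cons p b' => simp [hashGo, hashChk, List.lookup]
  | cons q a' ih =>
    obtain ⟨ka, va⟩ := q
    cases b with
    | nil => simp [hashGo]
    | cons p b' =>
      obtain ⟨kb, vb⟩ := p
      have ha' : a'.Pairwise (fun x y => x.1 < y.1) := ha.tail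
      have haHead : ∀ y ∈ a', ka < y.1 := by
        intro y hy; exact (List.pairwise_cons.mp ha).1 y hy
      have hbHead : ∀ y ∈ b', kb < y.1 := by
        intro y hy; exact (List.pairwise_cons.mp hb).1 y hy
      -- for any key ≠ ka, lookup through (ka,va)::a' skips the head
      have hskip : ∀ (k : String), k ≠ ka →
          (((ka, va) :: a').lookup k) = a'.lookup k := by
        intro k hk
        have : (k == ka) = false := by simp [hk]
        simp [List.lookup, this]
      by_cases h1 : ka < kb
      · -- advance the hash1 pointer
        rw [hashGo, if_pos h1, ih _ _ ha' hb]
        have hchk : ∀ p ∈ (kb, vb) :: b', hashChk a' p = hashChk ((ka, va) :: a') p := by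
          intro p hp
          have hgt : ka < p.1 := by
            rcases List.mem_cons.mp hp with h | h
            · rw [h]; exact h1
            · exact lt_trans h1 (hbHead p h)
          unfold hashChk
          rw [hskip p.1 (by exact fun e => absurd (e ▸ hgt) (lt_irrefl _))]
        rw [all_congr_mem (fun p hp => (hchk p hp))]
      · by_cases h2 : kb < ka
        · -- kb is smaller than every key of a: missing
          rw [hashGo, if_neg h1, if_pos (by simp [h2])]
          have hnone : (((ka, va) :: a').lookup kb) = none := by
            rw [← Option.not_isSome_iff_eq_none, lookup_isSome_iff]
            intro hm
            simp only [List.map_cons, List.mem_cons] at hm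
            rcases hm with h | h
            · exact absurd (h ▸ h2) (lt_irrefl _)
            · obtain ⟨y, hy, he⟩ := List.mem_map.mp h
              exact absurd (lt_trans h2 (haHead y hy)) (by rw [he]; exact lt_irrefl _)
          rw [if_neg]
          simp only [List.all_cons, Bool.and_eq_true, not_and]
          intro hc
          simp [hashChk, hnone] at hc
        · -- keys equal
          have hkeq : ka = kb := le_antisymm (not_lt.mp h2) (not_lt.mp h1)
          subst hkeq
          have hchkHead : hashChk ((ka, va) :: a') (ka, vb) = decide (vb ≤ va) := by
            simp [hashChk, List.lookup]
          by_cases h3 : va < vb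
          · rw [hashGo, if_neg h1, if_pos (by simp [h3])]
            rw [if_neg]
            simp only [List.all_cons, Bool.and_eq_true, not_and]
            intro hc
            rw [hchkHead] at hc
            simp only [decide_eq_true_eq] at hc
            omega
          · rw [hashGo, if_neg h1, if_neg (by simp [h3]), ih b' (total + vb) ha' (List.pairwise_cons.mp hb).2]
            have hchk : ∀ p ∈ b', hashChk a' p = hashChk ((ka, va) :: a') p := by
              intro p hp
              unfold hashChk
              rw [hskip p.1 (fun e => absurd (e ▸ hbHead p hp) (lt_irrefl _))]
            rw [all_congr_mem (fun p hp => (hchk p hp))]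
            have : hashChk ((ka, va) :: a') (ka, vb) = true := by
              rw [hchkHead]; simp; omega
            simp only [List.all_cons, this, Bool.true_and, List.map_cons, List.sum_cons]
            split_ifs <;> ring_nf

-- ===== VERDICT (by name: the statement is the Claim_ definition above) =====
theorem hashScore_spec : Claim_equal_hashScore := by
  intro hash1 hash2 _ hpre
  obtain ⟨hnd1, hnd2⟩ := hpre
  unfold Spec_hashScore hashScore hashScore_alt
  simp only []
  -- B's side: sorted lists are strictly key-sorted, so the merge-loop closed form applies
  have hsortedStrict : ∀ (l : List (String × Int)), (l.map Prod.fst).Nodup →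
      (PySem.List.sorted l (fun kv => kv.1) false).Pairwise (fun x y => x.1 < y.1) := by
    intro l hnd
    have hperm := PySem.List.sorted_perm l (fun kv => kv.1) false
    have hnd' : ((PySem.List.sorted l (fun kv => kv.1) false).map Prod.fst).Nodup :=
      ((hperm.map Prod.fst).nodup_iff).mpr hnd
    have hle : (PySem.List.sorted l (fun kv => kv.1) false).Pairwise
        (fun x y => x.1 ≤ y.1) := PySem.List.sorted_pairwise l (fun kv => kv.1)
    have hne : (PySem.List.sorted l (fun kv => kv.1) false).Pairwise
        (fun x y => x.1 ≠ y.1) := by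
      have := (List.pairwise_map).mp hnd'
      exact this
    exact (hle.and hne).imp (fun h => lt_of_le_of_ne h.1 h.2)
  have hBs := hashGo_char (PySem.List.sorted hash1 (fun kv => kv.1) false)
      (PySem.List.sorted hash2 (fun kv => kv.1) false) 0
      (hsortedStrict hash1 hnd1) (hsortedStrict hash2 hnd2)
  -- sorting changes neither the check nor the sum
  have hperm1 := PySem.List.sorted_perm hash1 (fun kv => kv.1) false
  have hperm2 := PySem.List.sorted_perm hash2 (fun kv => kv.1) false
  have hlkS : ∀ k, (PySem.List.sorted hash1 (fun kv => kv.1) false).lookup k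
      = hash1.lookup k := fun k => lookup_perm hnd1 hperm1 k
  have hallS : ((PySem.List.sorted hash2 (fun kv => kv.1) false).all
      (hashChk (PySem.List.sorted hash1 (fun kv => kv.1) false)))
      = hash2.all (hashChk hash1) := by
    rw [Bool.eq_iff_iff]
    simp only [List.all_eq_true]
    constructor
    · intro h p hp
      have := h p (hperm2.mem_iff.mpr hp)
      unfold hashChk at this ⊢; rw [hlkS] at this; exact this
    · intro h p hp
      have := h p (hperm2.mem_iff.mp hp)
      unfold hashChk at this ⊢; rw [hlkS]; exact this
  have hsumS : (((PySem.List.sorted hash2 (fun kv => kv.1) false).map Prod.snd).sum : Int)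
      = ((hash2.map Prod.snd).sum : Int) := (hperm2.map Prod.snd).sum_eq
  rw [hBs, hallS, hsumS]
  -- A's side
  by_cases hd : PySem.Set.len (PySem.Set.diff (PySem.Set.ofList (hash2.map Prod.fst))
      (PySem.Set.ofList (hash1.map Prod.fst))) ≠ 0
  · -- some key of hash2 is missing from hash1: A returns 0, B's merge fails on it
    rw [if_pos hd]
    have hne : PySem.Set.diff (PySem.Set.ofList (hash2.map Prod.fst))
        (PySem.Set.ofList (hash1.map Prod.fst)) ≠ [] := by
      intro h; exact hd (by rw [h]; rfl)
    obtain ⟨x, hx⟩ := List.exists_mem_of_ne_nil _ hne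
    have hx2 : x ∈ hash2.map Prod.fst ∧ x ∉ hash1.map Prod.fst := by
      have := (PySem.Set.mem_diff _ _ x).mp hx
      simpa [PySem.Set.mem_ofList] using this
    obtain ⟨⟨k, v⟩, hpmem, hpk⟩ := List.mem_map.mp hx2.1
    have hlk : hash1.lookup k = none := by
      rw [← Option.not_isSome_iff_eq_none]
      intro hs
      exact hx2.2 (hpk ▸ (lookup_isSome_iff hash1 k).mp hs)
    rw [if_neg]
    simp only [List.all_eq_true, not_forall]
    exact ⟨(k, v), hpmem, by simp [hashChk, hlk]⟩
  · -- every key of hash2 occurs in hash1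
    rw [if_neg hd]
    rw [not_not] at hd
    have hdiffnil : PySem.Set.diff (PySem.Set.ofList (hash2.map Prod.fst))
        (PySem.Set.ofList (hash1.map Prod.fst)) = [] :=
      List.length_eq_zero_iff.mp (Int.natCast_eq_zero.mp hd)
    have hsub : ∀ k, k ∈ hash2.map Prod.fst → k ∈ hash1.map Prod.fst := by
      intro k hk
      by_contra hnk
      have : k ∈ PySem.Set.diff (PySem.Set.ofList (hash2.map Prod.fst))
          (PySem.Set.ofList (hash1.map Prod.fst)) :=
        (PySem.Set.mem_diff _ _ k).mpr (by simp [PySem.Set.mem_ofList, hk, hnk])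
      rw [hdiffnil] at this; simp at this
    set inter := PySem.Set.inter (PySem.Set.ofList (hash1.map Prod.fst))
        (PySem.Set.ofList (hash2.map Prod.fst)) with hinter
    have hmemI : ∀ k, k ∈ inter ↔ k ∈ hash2.map Prod.fst := by
      intro k
      rw [hinter, PySem.Set.mem_inter]
      simp only [PySem.Set.mem_ofList]
      exact ⟨fun h => h.2, fun h => ⟨hsub k h, h⟩⟩
    have hlk2 : ∀ p ∈ hash2, hash2.lookup p.1 = some p.2 := fun p hp =>
      lookup_eq_of_mem hnd2 hp
    have hlk1 : ∀ p ∈ hash2, (hash1.lookup p.1).isSome := fun p hp =>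
      (lookup_isSome_iff hash1 p.1).mpr (hsub p.1 (List.mem_map_of_mem hp))
    rw [loopA_char]
    -- the two pass/fail conditions agree
    have hcond : (inter.all (fun k => decide ((hash2.lookup k).getD 0 ≤ (hash1.lookup k).getD 0)))
        = (hash2.all (hashChk hash1)) := by
      rw [Bool.eq_iff_iff]
      simp only [List.all_eq_true, decide_eq_true_eq]
      constructor
      · intro h p hp
        obtain ⟨w, hw⟩ := Option.isSome_iff_exists.mp (hlk1 p hp)
        have := h p.1 ((hmemI p.1).mpr (List.mem_map_of_mem hp))
        rw [hlk2 p hp, hw] at this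
        simp only [Option.getD_some] at this
        simp [hashChk, hw, this]
      · intro h k hk
        obtain ⟨⟨k', v⟩, hp, hk'⟩ := List.mem_map.mp ((hmemI k).mp hk)
        subst hk'
        have := h _ hp
        obtain ⟨w, hw⟩ := Option.isSome_iff_exists.mp (hlk1 _ hp)
        simp only [hashChk, hw, decide_eq_true_eq] at this
        rw [hlk2 _ hp, hw]
        simpa using this
    rw [hcond]
    by_cases hc : (hash2.all (hashChk hash1)) = true
    · rw [if_pos hc, if_pos hc]
      -- the two sums agree: inter is a permutation of hash2's key list
      have hperm : inter.Perm (hash2.map Prod.fst) :=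
        (List.perm_ext_iff_of_nodup
          (PySem.Set.nodup_inter _ _ (PySem.Set.nodup_ofList _)) hnd2).mpr hmemI
      have hsum : (inter.map (fun k => (hash2.lookup k).getD 0)).sum
          = (hash2.map Prod.snd).sum := by
        rw [(hperm.map (fun k => (hash2.lookup k).getD 0)).sum_eq]
        rw [List.map_map]
        congr 1
        apply List.map_congr_left
        intro p hp
        simp [hlk2 p hp]
      rw [hsum]
    · rw [if_neg hc, if_neg hc]
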